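-- pv_equiv track=rewrite | github.com/ky-42/cs-school-work | cs1003/1-assignment/encryption.py | generatePad
-- ===== SOURCE A (Python) =====
-- def generatePad(seed: list, k: int, length: int) -> list:
--
--     seed_len = len(seed)
--     pad = []
--
--     while len(pad) < length:
--         rand_num = seed[0] ^ seed[seed_len-k]
--         pad.append(rand_num)
--
--         # Shifts bits in seed
--         seed.append(rand_num)
--         del seed[0]
--
--     return pad
-- ===== SOURCE B (Python) =====
-- def generatePad(seed: list, k: int, length: int) -> list:
--     # Keep the whole sequence in one list and index backward with a fixed
--     # modular offset instead of sliding a window with append/del.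
--     # Mutates `seed` to the final window, like the original.
--     seed_len = len(seed)
--     out = list(seed)
--     if length > 0:
--         j = (seed_len - k) % seed_len
--         for i in range(length):
--             out.append(out[i] ^ out[i + j])
--         seed[:] = out[length:]
--     return out[seed_len:]
-- ===== Notes on version B (the rewrite author's own statement) =====
-- stated objective: faster
-- what changed: Instead of sliding a fixed-size window with append/del each step (del seed[0] shifts the whole window), B keeps the keystream in one growing list and reads the recurrence operands by absolute index i and i+(seed_len-k)%seed_len, folding A's negative-index behaviour for k>seed_len into one modular offset.
import Mathlib
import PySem

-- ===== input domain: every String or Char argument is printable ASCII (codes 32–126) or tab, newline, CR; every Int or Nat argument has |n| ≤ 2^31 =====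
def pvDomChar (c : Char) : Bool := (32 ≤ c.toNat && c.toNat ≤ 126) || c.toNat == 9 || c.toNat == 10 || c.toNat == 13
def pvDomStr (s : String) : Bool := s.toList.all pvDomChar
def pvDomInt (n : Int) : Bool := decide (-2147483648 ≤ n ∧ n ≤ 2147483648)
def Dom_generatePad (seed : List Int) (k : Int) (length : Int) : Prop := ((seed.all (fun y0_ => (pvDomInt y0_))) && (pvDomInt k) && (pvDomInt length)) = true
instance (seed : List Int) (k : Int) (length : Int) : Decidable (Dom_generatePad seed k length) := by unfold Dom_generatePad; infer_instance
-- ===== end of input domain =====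

-- B keeps the whole keystream in one list and indexes backward with a fixed modular
-- offset instead of sliding a window with append/del (objective: faster; each A step's del seed[0] shifts the window).
-- Equivalence is about the return value; the Python B also replicates A's mutation of `seed`.

-- ===== PORT A =====
-- while len(pad) < length: pad grows by one each iteration, so the loop runs
-- exactly length.toNat times; fuel counts the remaining iterations.
def padLoopA (k L : Int) : Nat → List Int → List Int → List Int
  | 0, _, pad => pad
  | f + 1, seed, pad =>
      let r := PySem.Int.bxor (PySem.List.pyGetD seed 0 0) (PySem.List.pyGetD seed (L - k) 0)
      padLoopA k L f ((seed ++ [r]).tail) (pad ++ [r])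

def generatePad (seed : List Int) (k : Int) (length : Int) : List Int :=
  padLoopA k (seed.length : Int) length.toNat seed []

-- ===== PORT B =====
-- out.append(out[i] ^ out[i + j]) for the current i of range(length)
def bstep (j : Int) (out : List Int) (i : Int) : List Int :=
  out ++ [PySem.Int.bxor (PySem.List.pyGetD out i 0) (PySem.List.pyGetD out (i + j) 0)]

def generatePad_alt (seed : List Int) (k : Int) (length : Int) : List Int :=
  let seedLen : Int := (seed.length : Int)
  let out :=
    if length > 0 then
      let j := PySem.Int.mod (seedLen - k) seedLen
      (PySem.List.pyRange 0 length 1).foldl (bstep j) seed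
    else seed
  PySem.List.slice out (some seedLen) none

-- ===== PRECONDITION & SPEC =====
-- Pre_ excludes exactly the inputs where A raises IndexError: a positive length with
-- k outside [1, 2*len(seed)] (including an empty seed), where seed[seed_len-k] is out of range.
def Pre_generatePad (seed : List Int) (k : Int) (length : Int) : Prop :=
  length ≤ 0 ∨ (1 ≤ k ∧ k ≤ 2 * (seed.length : Int))
instance (seed : List Int) (k : Int) (length : Int) : Decidable (Pre_generatePad seed k length) := by
  unfold Pre_generatePad; infer_instance

def pvWitness_generatePad : List Int × Int × Int := ([5, 9, 3], 2, 6)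

def Spec_generatePad (seed : List Int) (k : Int) (length : Int) (out : List Int) : Prop := out = generatePad_alt seed k length
instance (seed : List Int) (k : Int) (length : Int) (out : List Int) : Decidable (Spec_generatePad seed k length out) := by unfold Spec_generatePad; infer_instance

-- ===== CLAIM (what is proved, stated in full; the proofs are below) =====
def Claim_equal_generatePad : Prop := ∀ (seed : List Int) (k : Int) (length : Int), Dom_generatePad seed k length → Pre_generatePad seed k length → Spec_generatePad seed k length (generatePad seed k length)

-- ===== LEMMAS AND PROOFS =====

-- A's pad is a pure accumulator
lemma padLoopA_pad (k L : Int) :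
    ∀ (f : Nat) (w pad : List Int), padLoopA k L f w pad = pad ++ padLoopA k L f w [] := by
  intro f
  induction f with
  | zero => intro w pad; simp [padLoopA]
  | succ f ih =>
      intro w pad
      simp only [padLoopA]
      rw [ih _ (pad ++ _), ih _ ([] ++ _)]
      simp

-- B's fold only ever appends to its accumulator
lemma foldl_bstep_prefix (j : Int) :
    ∀ (rng : List Int) (out : List Int), ∃ t, rng.foldl (bstep j) out = out ++ t := by
  intro rng
  induction rng with
  | nil => intro out; exact ⟨[], by simp⟩
  | cons a rng ih =>
      intro out
      obtain ⟨t, ht⟩ := ih (bstep j out a)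
      refine ⟨[PySem.Int.bxor (PySem.List.pyGetD out a 0) (PySem.List.pyGetD out (a + j) 0)] ++ t, ?_⟩
      simpa [bstep, List.append_assoc] using ht

-- reading the window at seed_len - k (possibly negative) = reading at the modular offset j
lemma window_read (k : Int) (L : Nat) (hk1 : 1 ≤ k) (hk2 : k ≤ 2 * (L : Int))
    (w : List Int) (hw : w.length = L) :
    PySem.List.pyGetD w ((L : Int) - k) 0 =
      w.getD (PySem.Int.mod ((L : Int) - k) (L : Int)).toNat 0 := by
  have hL : 0 < (L : Int) := by omega
  rw [PySem.Int.mod_eq_emod_of_pos hL]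
  by_cases hkL : k ≤ (L : Int)
  · have h0 : (0 : Int) ≤ (L : Int) - k := by omega
    have hlt : (L : Int) - k < (L : Int) := by omega
    rw [Int.emod_eq_of_lt h0 hlt]
    rw [PySem.List.pyGetD_eq_getElem _ _ h0 (by rw [hw]; exact_mod_cast hlt)]
    rw [List.getD_eq_getElem _ _ (by rw [hw]; omega)]
  · have hneg : (L : Int) - k = -(((k - L).toNat : Nat) : Int) := by omega
    have hpos : 0 < (k - (L : Int)).toNat := by omega
    have hle : (k - (L : Int)).toNat ≤ w.length := by rw [hw]; omega
    have hmod : ((L : Int) - k) % (L : Int) = (L : Int) - k + L := by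
      have h := Int.add_mul_emod_self_left (a := (L : Int) - k + L) (b := (L : Int)) (c := -1)
      have h2 : (L : Int) - k + L + (L : Int) * (-1) = (L : Int) - k := by ring
      rw [h2] at h
      rw [h]
      exact Int.emod_eq_of_lt (by omega) (by omega)
    rw [hmod, hneg, PySem.List.pyGetD_neg_natCast _ _ _ hpos hle]
    rw [List.getD_eq_getElem _ _ (by omega)]
    congr 1
    omega

-- main invariant: A's window is the last L elements of B's growing list
lemma key (k j : Int) (L : Nat) (hL : 1 ≤ L) (hk1 : 1 ≤ k) (hk2 : k ≤ 2 * (L : Int))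
    (hj : j = PySem.Int.mod ((L : Int) - k) (L : Int)) :
    ∀ (f i : Nat) (out : List Int), out.length = i + L →
      padLoopA k (L : Int) f (out.drop i) [] =
        ((PySem.List.pyRange (i : Int) ((i + f : Nat) : Int) 1).foldl (bstep j) out).drop (i + L) := by
  intro f
  have hL' : (0 : Int) < (L : Int) := by omega
  have hj0 : 0 ≤ j := hj ▸ PySem.Int.mod_nonneg _ hL'
  have hjL : j < (L : Int) := hj ▸ PySem.Int.mod_lt _ hL'
  induction f with
  | zero =>
      intro i out hlen
      have : PySem.List.pyRange (i : Int) ((i + 0 : Nat) : Int) 1 = [] := by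
        simp [PySem.List.pyRange]
      rw [this]
      simp only [padLoopA, List.foldl]
      exact (List.drop_eq_nil_of_le (by omega)).symm
  | succ f ih =>
      intro i out hlen
      have hwlen : (out.drop i).length = L := by simp [hlen]
      have hrng : PySem.List.pyRange (i : Int) ((i + (f + 1) : Nat) : Int) 1 =
          (i : Int) :: PySem.List.pyRange ((i : Int) + 1) ((i + (f + 1) : Nat) : Int) 1 := by
        apply PySem.List.pyRange_one_cons
        push_cast; omega
      -- the two computed random numbers agree
      have hjnat : (i : Int) + j = (((i + j.toNat : Nat) : Nat) : Int) := by push_cast; omega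
      have hwin : PySem.List.pyGetD (out.drop i) ((L : Int) - k) 0 = out.getD (i + j.toNat) 0 := by
        rw [window_read k L hk1 hk2 _ hwlen, ← hj]
        rw [List.getD_eq_getElem?_getD, List.getElem?_drop, ← List.getD_eq_getElem?_getD]
      have hw0 : PySem.List.pyGetD (out.drop i) 0 0 = out.getD i 0 := by
        rw [PySem.List.pyGetD_zero]
        rw [List.getD_eq_getElem?_getD, List.getElem?_drop, ← List.getD_eq_getElem?_getD]
        simp
      set r := PySem.Int.bxor (out.getD i 0) (out.getD (i + j.toNat) 0) with hr
      have hbstep : bstep j out (i : Int) = out ++ [r] := by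
        simp only [bstep, hjnat, PySem.List.pyGetD_natCast, hr]
      -- step A's loop once
      have hAstep : padLoopA k (L : Int) (f + 1) (out.drop i) [] =
          r :: padLoopA k (L : Int) f ((out ++ [r]).drop (i + 1)) [] := by
        simp only [padLoopA, hw0, hwin, ← hr]
        rw [padLoopA_pad]
        have hne : out.drop i ≠ [] := by
          intro h; have := congrArg List.length h; simp [hwlen] at this; omega
        rw [← List.tail_drop, List.drop_append_of_le_length (by omega)]
        cases h : out.drop i with
        | nil => exact absurd h hne
        | cons a w' => simp
      rw [hAstep, hrng]
      simp only [List.foldl, hbstep]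
      have hlen' : (out ++ [r]).length = (i + 1) + L := by simp [hlen]; omega
      have hcast : ((i : Int) + 1) = (((i + 1 : Nat) : Nat) : Int) := by push_cast; ring
      have hcast2 : ((i + (f + 1) : Nat) : Int) = (((i + 1) + f : Nat) : Int) := by push_cast; ring
      rw [hcast, hcast2, ih (i + 1) (out ++ [r]) hlen']
      obtain ⟨t, ht⟩ := foldl_bstep_prefix j (PySem.List.pyRange ((i + 1 : Nat) : Int) (((i + 1) + f : Nat) : Int) 1) (out ++ [r])
      rw [ht]
      have h1 : (out ++ [r] ++ t).drop (i + L) = r :: t := by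
        have : out ++ [r] ++ t = out ++ ([r] ++ t) := by simp
        rw [this, ← hlen, List.drop_left]
        simp
      have h2 : (out ++ [r] ++ t).drop ((i + 1) + L) = t := by
        have : (i + 1) + L = (out ++ [r]).length := by rw [hlen']
        rw [this, List.drop_left]
      rw [h1, h2]

-- ===== VERDICT (by name: the statement is the Claim_ definition above) =====
theorem generatePad_spec : Claim_equal_generatePad := by
  intro seed k length _ hpre
  unfold Spec_generatePad generatePad generatePad_alt
  by_cases hlen : length > 0
  · have hk : 1 ≤ k ∧ k ≤ 2 * (seed.length : Int) := by
      rcases hpre with h | h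
      · omega
      · exact h
    have hL : 1 ≤ seed.length := by
      rcases hk with ⟨h1, h2⟩
      by_contra h
      have : seed.length = 0 := by omega
      rw [this] at h2; omega
    simp only [if_pos hlen]
    have := key k (PySem.Int.mod ((seed.length : Int) - k) (seed.length : Int)) seed.length hL hk.1 hk.2 rfl
      length.toNat 0 seed (by omega)
    simp only [List.drop_zero, Nat.zero_add, Nat.cast_zero] at this
    rw [PySem.List.slice_from_natCast]
    have hc : ((length.toNat : Nat) : Int) = length := Int.toNat_of_nonneg (by omega)
    rw [hc] at this
    exact this
  · have h0 : length.toNat = 0 := by omega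
    rw [h0]
    simp only [padLoopA, if_neg hlen]
    rw [PySem.List.slice_from_natCast, List.drop_length]
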